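-- pv_equiv track=rewrite | github.com/JacobLiou/VIAVI---Santec-Testers | driver/viavi_driver.py | _build_channel_string
-- ===== SOURCE A (Python) =====
-- def _build_channel_string(channels: list[int]) -> str:
--     """
--     Build channel string for PATH:LIST command.
--     Tries to build range notation (e.g., "1-12") when possible.
--     """
--     if not channels:
--         return ""
--
--     channels_sorted = sorted(channels)
--
--     # Check if it's a contiguous range
--     if channels_sorted == list(
--         range(channels_sorted[0], channels_sorted[-1] + 1)
--     ):
--         return f"{channels_sorted[0]}-{channels_sorted[-1]}"
--
--     # Otherwise, comma-separated
--     return ",".join(str(ch) for ch in channels_sorted)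
-- ===== SOURCE B (Python) =====
-- def _build_channel_string(channels: list[int]) -> str:
--     if not channels:
--         return ""
--     mn = min(channels)
--     mx = max(channels)
--     if len(set(channels)) == len(channels) and mx - mn + 1 == len(channels):
--         return f"{mn}-{mx}"
--     return ",".join(str(ch) for ch in sorted(channels))
-- ===== Notes on version B (the rewrite author's own statement) =====
-- stated objective: simpler
-- what changed: Replaces A's materialised list(range(min,max+1)) and whole-list comparison against the sorted list with an O(n) arithmetic contiguity test (distinctness via a set plus max-min+1 == len), sorting only in the non-contiguous branch.
import Mathlib
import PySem

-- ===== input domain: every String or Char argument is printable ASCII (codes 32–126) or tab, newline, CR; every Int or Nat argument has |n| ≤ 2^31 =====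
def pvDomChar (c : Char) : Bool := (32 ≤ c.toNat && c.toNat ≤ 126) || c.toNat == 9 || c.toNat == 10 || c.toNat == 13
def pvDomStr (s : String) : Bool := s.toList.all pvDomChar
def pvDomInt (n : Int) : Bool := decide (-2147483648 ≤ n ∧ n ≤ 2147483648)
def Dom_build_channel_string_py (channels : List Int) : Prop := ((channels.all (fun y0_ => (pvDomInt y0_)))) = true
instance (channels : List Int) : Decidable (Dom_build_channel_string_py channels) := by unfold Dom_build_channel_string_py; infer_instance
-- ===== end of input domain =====

-- B replaces A's "build list(range(min,max+1)) and compare with the sorted list" contiguity test by an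
-- arithmetic one (all elements distinct and max-min+1 == len), sorting only in the non-contiguous branch.

-- ===== PORT A =====
def build_channel_string_py (channels : List Int) : String :=
  if channels = [] then ""
  else
    let s := PySem.List.sorted channels (fun x => x) false
    let a := PySem.List.pyGetD s 0 0          -- channels_sorted[0]; in range: s nonempty here
    let b := PySem.List.pyGetD s (-1) 0       -- channels_sorted[-1]
    if s = PySem.List.pyRange a (b + 1) 1 then
      PySem.Int.toStr a ++ "-" ++ PySem.Int.toStr b
    else
      PySem.Str.join "," (s.map PySem.Int.toStr)

-- ===== PORT B =====
def build_channel_string_py_alt (channels : List Int) : String :=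
  if channels = [] then ""
  else
    let mn := (PySem.List.min? channels (fun x => x)).getD 0
    let mx := (PySem.List.max? channels (fun x => x)).getD 0
    if (PySem.Set.ofList channels).length = channels.length
        ∧ mx - mn + 1 = (channels.length : Int) then
      PySem.Int.toStr mn ++ "-" ++ PySem.Int.toStr mx
    else
      PySem.Str.join "," ((PySem.List.sorted channels (fun x => x) false).map PySem.Int.toStr)

-- ===== PRECONDITION & SPEC =====
def Spec_build_channel_string_py (channels : List Int) (out : String) : Prop := out = build_channel_string_py_alt channels
instance (channels : List Int) (out : String) : Decidable (Spec_build_channel_string_py channels out) := by unfold Spec_build_channel_string_py; infer_instance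

-- ===== CLAIM (what is proved, stated in full; the proofs are below) =====
def Claim_equal_build_channel_string_py : Prop := ∀ (channels : List Int), Dom_build_channel_string_py channels → Spec_build_channel_string_py channels (build_channel_string_py channels)

-- ===== LEMMAS AND PROOFS =====

-- set(xs) has as many elements as xs exactly when xs has no duplicates
theorem ofList_length_eq_iff_nodup (xs : List Int) :
    (PySem.Set.ofList xs).length = xs.length ↔ xs.Nodup := by
  constructor
  · intro h
    have hperm : (PySem.Set.ofList xs).Perm xs.dedup := by
      rw [List.perm_ext_iff_of_nodup (PySem.Set.nodup_ofList xs) xs.nodup_dedup]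
      intro x
      simp [PySem.Set.mem_ofList, List.mem_dedup]
    have hlen : xs.dedup.length = xs.length := by
      rw [← hperm.length_eq]; exact h
    have : xs.dedup = xs := (List.dedup_sublist xs).eq_of_length hlen
    exact List.dedup_eq_self.mp this
  · intro h
    rw [PySem.Set.ofList_eq_self_of_nodup xs h]

-- every element of a sorted list is ≤ its last element
theorem sorted_le_getLast (xs : List Int) (h : PySem.List.sorted xs (fun x => x) false ≠ [])
    (y : Int) (hy : y ∈ PySem.List.sorted xs (fun x => x) false) :
    y ≤ (PySem.List.sorted xs (fun x => x) false).getLast h := by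
  obtain ⟨p, hp, hyp⟩ := List.mem_iff_getElem.mp hy
  rw [List.getLast_eq_getElem]
  rw [← hyp]
  exact PySem.List.sorted_id_getElem_mono xs (by omega) (by omega)

theorem build_channel_string_py_main (channels : List Int) :
    build_channel_string_py channels = build_channel_string_py_alt channels := by
  by_cases hnil : channels = []
  · simp [build_channel_string_py, build_channel_string_py_alt, hnil]
  · unfold build_channel_string_py build_channel_string_py_alt
    simp only [if_neg hnil]
    set s := PySem.List.sorted channels (fun x => x) false with hs
    have hsne : s ≠ [] := by
      rw [hs, Ne, PySem.List.sorted_eq_nil_iff]; exact hnil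
    obtain ⟨m, t, hmt⟩ := List.exists_cons_of_ne_nil hsne
    have ha : PySem.List.pyGetD s 0 0 = m := by rw [hmt]; exact PySem.List.pyGetD_zero_cons m t 0
    set b := s.getLast hsne with hbdef
    have hb : PySem.List.pyGetD s (-1) 0 = b := PySem.List.pyGetD_neg_one s 0 hsne
    have hperm : s.Perm channels := PySem.List.sorted_perm channels (fun x => x) false
    have hm_mem : m ∈ channels := hperm.mem_iff.mp (by rw [hmt]; exact List.mem_cons_self)
    have hb_mem : b ∈ channels := hperm.mem_iff.mp (List.getLast_mem hsne)
    have hmin : ∀ y ∈ channels, m ≤ y := by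
      intro y hy
      exact PySem.List.key_head_sorted_le channels (fun x => x) (hs ▸ hmt) y hy
    have hmax : ∀ y ∈ channels, y ≤ b := by
      intro y hy
      exact sorted_le_getLast channels hsne y (hperm.mem_iff.mpr hy)
    have hmb : m ≤ b := hmax m hm_mem
    -- min?/max? name exactly m and b
    have hmn : (PySem.List.min? channels (fun x => x)).getD 0 = m := by
      obtain ⟨v, hv⟩ := Option.ne_none_iff_exists'.mp
        (by rw [Ne, PySem.List.min?_eq_none_iff]; exact hnil :
          PySem.List.min? channels (fun x => x) ≠ none)
      have hvmem := PySem.List.min?_mem hv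
      have hvmin := PySem.List.min?_isMin hv
      rw [hv, Option.getD_some]
      exact le_antisymm (hvmin m hm_mem) (hmin v hvmem)
    have hmx : (PySem.List.max? channels (fun x => x)).getD 0 = b := by
      obtain ⟨v, hv⟩ := Option.ne_none_iff_exists'.mp
        (by rw [Ne, PySem.List.max?_eq_none_iff]; exact hnil :
          PySem.List.max? channels (fun x => x) ≠ none)
      have hvmem := PySem.List.max?_mem hv
      have hvmax := PySem.List.max?_isMax hv
      rw [hv, Option.getD_some]
      exact le_antisymm (hmax v hvmem) (hvmax b hb_mem)
    -- the two contiguity tests are equivalent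
    have hcond : s = PySem.List.pyRange m (b + 1) 1 ↔
        (channels.Nodup ∧ b - m + 1 = (channels.length : Int)) := by
      constructor
      · intro h
        have hnd : channels.Nodup := hperm.nodup_iff.mp (h ▸ PySem.List.nodup_pyRange_one m (b+1))
        refine ⟨hnd, ?_⟩
        have hlen : channels.length = s.length := hperm.length_eq.symm
        rw [h, PySem.List.length_pyRange_one] at hlen
        omega
      · rintro ⟨hnd, hlen⟩
        have hsnd : s.Nodup := hperm.nodup_iff.mpr hnd
        -- pigeonhole: len distinct ints in [m,b] with b-m+1 = len fill the whole interval
        have hsub : channels.toFinset ⊆ Finset.Icc m b := by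
          intro x hx
          rw [List.mem_toFinset] at hx
          exact Finset.mem_Icc.mpr ⟨hmin x hx, hmax x hx⟩
        have hcard : (Finset.Icc m b).card = channels.toFinset.card := by
          rw [Int.card_Icc, List.toFinset_card_of_nodup hnd]; omega
        have heq : channels.toFinset = Finset.Icc m b :=
          Finset.eq_of_subset_of_card_le hsub (le_of_eq hcard)
        have hmemiff : ∀ x, x ∈ channels ↔ (m ≤ x ∧ x ≤ b) := by
          intro x
          rw [← List.mem_toFinset, heq, Finset.mem_Icc]
        have hpermr : (PySem.List.pyRange m (b + 1) 1).Perm channels := by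
          rw [List.perm_ext_iff_of_nodup (PySem.List.nodup_pyRange_one m (b+1)) hnd]
          intro x
          rw [PySem.List.mem_pyRange_one, hmemiff]
          omega
        exact PySem.List.sorted_eq_of_perm_of_pairwise_lt channels (PySem.List.pyRange m (b+1) 1) (fun x => x) hpermr
          (PySem.List.pairwise_lt_pyRange_one m (b+1))
    rw [ha, hb, hmn, hmx]
    by_cases hA : s = PySem.List.pyRange m (b + 1) 1
    · rw [if_pos hA]
      rw [if_pos ⟨(ofList_length_eq_iff_nodup channels).mpr (hcond.mp hA).1, (hcond.mp hA).2⟩]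
    · rw [if_neg hA]
      rw [if_neg (by
        rintro ⟨h1, h2⟩
        exact hA (hcond.mpr ⟨(ofList_length_eq_iff_nodup channels).mp h1, h2⟩))]

-- ===== VERDICT (by name: the statement is the Claim_ definition above) =====
theorem build_channel_string_py_spec : Claim_equal_build_channel_string_py := by
  intro channels _
  exact build_channel_string_py_main channels
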